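-- pv_equiv track=rewrite | github.com/ehzan/advent-of-code | 2021/day7.py | f
-- ===== SOURCE A (Python) =====
-- def f(x, nx, g):
--     value = 0
--     if x == 0:
--         for i in range(len(nx)):
--             value += i * nx[i]
--     else:
--         value = f(x - 1, nx, g) + g[x]
--     return value
-- ===== SOURCE B (Python) =====
-- def f(x, nx, g):
--     base = sum(i * v for i, v in enumerate(nx))
--     return base + sum(g[k] for k in range(1, x + 1))
-- ===== Notes on version B (the rewrite author's own statement) =====
-- stated objective: simpler
-- what changed: Replaces the depth-x linear recursion (base case an indexed for-loop) by two generator-expression sums: an enumerate-sum for the weighted base plus the sum of g[1..x]; no recursion, no index loop, constant stack.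
import Mathlib
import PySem

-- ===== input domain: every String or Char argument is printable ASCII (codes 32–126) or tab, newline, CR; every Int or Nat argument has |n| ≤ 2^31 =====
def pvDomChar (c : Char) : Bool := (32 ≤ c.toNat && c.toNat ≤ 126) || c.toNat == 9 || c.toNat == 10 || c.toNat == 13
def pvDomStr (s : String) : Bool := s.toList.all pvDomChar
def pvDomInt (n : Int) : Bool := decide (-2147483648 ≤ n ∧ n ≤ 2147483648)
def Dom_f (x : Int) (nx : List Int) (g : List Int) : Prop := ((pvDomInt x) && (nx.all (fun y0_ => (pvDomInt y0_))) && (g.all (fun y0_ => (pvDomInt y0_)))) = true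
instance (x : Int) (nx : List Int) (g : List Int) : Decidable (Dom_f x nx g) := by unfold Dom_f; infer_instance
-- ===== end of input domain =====

-- B replaces A's depth-x recursion by an enumerate-sum for the weighted base plus a
-- slice-sum of g[1:x+1]; objective: simpler (no recursion, no index loop); return values agree on Pre_f.

-- ===== PORT A =====
-- literal port of A's recursion; the 'x < 0' guard only makes the definition total:
-- there Python recurses until RecursionError, excluded by Pre_f, nothing is claimed.
def f (x : Int) (nx : List Int) (g : List Int) : Int :=
  if x == 0 then
    (PySem.List.pyRange 0 nx.length 1).foldl (fun value i => value + i * PySem.List.pyGetD nx i 0) 0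
  else if x < 0 then 0
  else f (x - 1) nx g + PySem.List.pyGetD g x 0
termination_by x.toNat
decreasing_by simp_all; omega

-- ===== PORT B =====
def f_alt (x : Int) (nx : List Int) (g : List Int) : Int :=
  let base := ((PySem.List.enumerate nx 0).map (fun p => p.1 * p.2)).sum
  base + ((PySem.List.pyRange 1 (x + 1) 1).map (fun k => PySem.List.pyGetD g k 0)).sum

-- ===== PRECONDITION & SPEC =====
-- Pre_f: exactly the inputs where A returns: x ≥ 0 (negative x recurses forever) and,
-- unless x = 0, index x (hence 1..x) must be in range for g (else IndexError).
def Pre_f (x : Int) (nx : List Int) (g : List Int) : Prop :=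
  0 ≤ x ∧ (x = 0 ∨ x < (g.length : Int))
instance (x : Int) (nx : List Int) (g : List Int) : Decidable (Pre_f x nx g) := by unfold Pre_f; infer_instance
def pvWitness_f : Int × List Int × List Int := (2, [3, 4], [10, 20, 30])

def Spec_f (x : Int) (nx : List Int) (g : List Int) (out : Int) : Prop := out = f_alt x nx g
instance (x : Int) (nx : List Int) (g : List Int) (out : Int) : Decidable (Spec_f x nx g out) := by unfold Spec_f; infer_instance

-- ===== CLAIM (what is proved, stated in full; the proofs are below) =====
def Claim_equal_f : Prop := ∀ (x : Int) (nx : List Int) (g : List Int), Dom_f x nx g → Pre_f x nx g → Spec_f x nx g (f x nx g)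

-- ===== LEMMAS AND PROOFS =====
-- B's base (enumerate then multiply-sum) equals A's indexed foldl over range(len(nx)).
lemma base_eq (nx : List Int) :
    ((PySem.List.enumerate nx 0).map (fun p => p.1 * p.2)).sum =
      (PySem.List.pyRange 0 nx.length 1).foldl (fun value i => value + i * PySem.List.pyGetD nx i 0) 0 := by
  rw [PySem.List.foldl_add, PySem.List.enumerate_eq_map_pyRange (d := 0), List.map_map]
  simp [Function.comp_def]

lemma prefix_zero (g : List Int) :
    ((PySem.List.pyRange 1 ((0 : Int) + 1) 1).map (fun k => PySem.List.pyGetD g k 0)).sum = 0 := by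
  norm_num [PySem.List.pyRange_one_eq_nil]

lemma prefix_succ (g : List Int) (m : Nat) :
    ((PySem.List.pyRange 1 (((m : Nat) + 1 : Int) + 1) 1).map (fun k => PySem.List.pyGetD g k 0)).sum =
      ((PySem.List.pyRange 1 ((m : Int) + 1) 1).map (fun k => PySem.List.pyGetD g k 0)).sum
        + PySem.List.pyGetD g ((m : Int) + 1) 0 := by
  rw [show (((m : Nat) + 1 : Int) + 1) = ((m : Int) + 1) + 1 by ring,
      PySem.List.pyRange_one_succ_right (by omega)]
  simp

lemma f_eq_alt_nat (n : Nat) (nx g : List Int) (hg : n = 0 ∨ n < g.length) :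
    f (n : Int) nx g = f_alt (n : Int) nx g := by
  induction n with
  | zero =>
    rw [f.eq_def, f_alt]
    simp only [Nat.cast_zero]
    rw [prefix_zero, base_eq]
    simp
  | succ m ih =>
    have hm' : m = 0 ∨ m < g.length := by omega
    rw [f.eq_def]
    rw [if_neg (by simp; omega), if_neg (by push_cast; omega)]
    have hsub : ((((m : Nat) + 1 : Nat) : Int) - 1) = ((m : Nat) : Int) := by push_cast; ring
    rw [hsub, ih hm', f_alt, f_alt]
    push_cast
    rw [prefix_succ]
    ring

-- ===== VERDICT (by name: the statement is the Claim_ definition above) =====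
theorem f_spec : Claim_equal_f := by
  intro x nx g _ hpre
  unfold Spec_f
  obtain ⟨hx, hor⟩ := hpre
  obtain ⟨n, rfl⟩ : ∃ n : Nat, x = (n : Int) := ⟨x.toNat, by omega⟩
  refine f_eq_alt_nat n nx g ?_
  rcases hor with h | h
  · left; omega
  · right; omega
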